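-- pv_equiv track=rewrite | github.com/GAIMHE/visu_streamlit | src/visu2/m1_individual_path.py | _last_distinct_transitions
-- ===== SOURCE A (Python) =====
-- def _last_distinct_transitions(mapped_sequence: list[str], max_transitions: int = 3) -> list[tuple[str, str]]:
--     if not mapped_sequence:
--         return []
--     compressed: list[str] = []
--     for activity_id in mapped_sequence:
--         if not compressed or compressed[-1] != activity_id:
--             compressed.append(activity_id)
--     transitions = list(zip(compressed[:-1], compressed[1:], strict=False))
--     return transitions[-max(1, int(max_transitions)) :]
-- ===== SOURCE B (Python) =====
-- def _last_distinct_transitions(mapped_sequence: list[str], max_transitions: int = 3) -> list[tuple[str, str]]: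
--     if not mapped_sequence:
--         return []
--     prev = mapped_sequence[0]
--     transitions: list[tuple[str, str]] = []
--     for current in mapped_sequence[1:]:
--         if current != prev:
--             transitions.append((prev, current))
--             prev = current
--     return transitions[-max(1, int(max_transitions)):]
-- ===== Notes on version B (the rewrite author's own statement) =====
-- stated objective: simpler
-- what changed: Fuses the compress-then-zip pipeline into a single pass that tracks only the last distinct value and emits each transition pair directly, never building the compressed list.
import Mathlib
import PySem

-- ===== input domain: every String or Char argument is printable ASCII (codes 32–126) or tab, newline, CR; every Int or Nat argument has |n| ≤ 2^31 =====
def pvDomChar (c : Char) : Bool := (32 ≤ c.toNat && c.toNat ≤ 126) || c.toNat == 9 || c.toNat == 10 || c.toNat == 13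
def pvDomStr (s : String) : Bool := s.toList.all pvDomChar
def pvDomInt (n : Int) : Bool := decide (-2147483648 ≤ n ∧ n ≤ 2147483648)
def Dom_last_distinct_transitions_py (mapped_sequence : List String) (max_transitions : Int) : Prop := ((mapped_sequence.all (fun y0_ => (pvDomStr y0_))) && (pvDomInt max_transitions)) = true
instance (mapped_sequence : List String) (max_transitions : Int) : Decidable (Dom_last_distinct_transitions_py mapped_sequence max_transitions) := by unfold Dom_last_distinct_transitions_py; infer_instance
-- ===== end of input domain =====

-- B fuses A's compress-then-zip pipeline into a single pass tracking only the last distinct value (objective: simpler).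

-- ===== PORT A =====
def last_distinct_transitions_py (mapped_sequence : List String) (max_transitions : Int) : List (String × String) :=
  if mapped_sequence = [] then []
  else
    let compressed := mapped_sequence.foldl
      (fun acc activity_id =>
        if acc = [] ∨ acc.getLast? ≠ some activity_id then acc ++ [activity_id] else acc) []
    let transitions := List.zip (PySem.List.slice compressed none (some (-1)))
                                (PySem.List.slice compressed (some 1) none)
    PySem.List.slice transitions (some (-(max 1 max_transitions))) none

-- ===== PORT B =====
def last_distinct_transitions_py_alt (mapped_sequence : List String) (max_transitions : Int) : List (String × String) :=
  match mapped_sequence with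
  | [] => []
  | h :: t =>
    let st := t.foldl
      (fun (st : String × List (String × String)) current =>
        if current ≠ st.1 then (current, st.2 ++ [(st.1, current)]) else st) (h, [])
    PySem.List.slice st.2 (some (-(max 1 max_transitions))) none

-- ===== PRECONDITION & SPEC =====
def Spec_last_distinct_transitions_py (mapped_sequence : List String) (max_transitions : Int) (out : List (String × String)) : Prop := out = last_distinct_transitions_py_alt mapped_sequence max_transitions
instance (mapped_sequence : List String) (max_transitions : Int) (out : List (String × String)) : Decidable (Spec_last_distinct_transitions_py mapped_sequence max_transitions out) := by unfold Spec_last_distinct_transitions_py; infer_instance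

-- ===== CLAIM (what is proved, stated in full; the proofs are below) =====
def Claim_equal_last_distinct_transitions_py : Prop := ∀ (mapped_sequence : List String) (max_transitions : Int), Dom_last_distinct_transitions_py mapped_sequence max_transitions → Spec_last_distinct_transitions_py mapped_sequence max_transitions (last_distinct_transitions_py mapped_sequence max_transitions)

-- ===== LEMMAS AND PROOFS =====

def pvStepA (acc : List String) (a : String) : List String :=
  if acc = [] ∨ acc.getLast? ≠ some a then acc ++ [a] else acc

def pvStepB (st : String × List (String × String)) (current : String) : String × List (String × String) :=
  if current ≠ st.1 then (current, st.2 ++ [(st.1, current)]) else st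

def pvPairs (c : List String) : List (String × String) := List.zip c c.tail

theorem pv_zip_dropLast_tail : ∀ (c : List String), List.zip c.dropLast c.tail = List.zip c c.tail := by
  intro c
  induction c with
  | nil => rfl
  | cons a c ih =>
    cases c with
    | nil => rfl
    | cons b r =>
      simp only [List.tail_cons] at ih ⊢
      show (a :: (b :: r).dropLast).zip (b :: r) = (a, b) :: (b :: r).zip r
      rw [List.zip_cons_cons, ih]

theorem pv_pairs_append (c : List String) (a p : String) (h : c.getLast? = some p) :
    pvPairs (c ++ [a]) = pvPairs c ++ [(p, a)] := by
  induction c with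
  | nil => simp at h
  | cons x c ih =>
    cases c with
    | nil => simp_all [pvPairs]
    | cons y r =>
      rw [List.getLast?_cons_cons] at h
      have := ih h
      simp only [pvPairs, List.cons_append, List.tail_cons, List.zip_cons_cons] at this ⊢
      exact congrArg (List.cons (x, y)) this

theorem pv_fold_key : ∀ (t c : List String) (p : String), c.getLast? = some p →
    pvPairs (t.foldl pvStepA c) = (t.foldl pvStepB (p, pvPairs c)).2 := by
  intro t
  induction t with
  | nil => intro c p _; rfl
  | cons a t ih =>
    intro c p h
    have hc : c ≠ [] := by intro hn; rw [hn] at h; simp at h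
    by_cases hap : a = p
    · subst hap
      have hA : pvStepA c a = c := by simp [pvStepA, hc, h]
      have hB : pvStepB (a, pvPairs c) a = (a, pvPairs c) := by simp [pvStepB]
      simp only [List.foldl_cons, hA, hB]
      exact ih c a h
    · have hA : pvStepA c a = c ++ [a] := by
        simp [pvStepA, hc, h]
        exact fun he => hap he.symm
      have hB : pvStepB (p, pvPairs c) a = (a, pvPairs c ++ [(p, a)]) := by
        simp [pvStepB, hap]
      simp only [List.foldl_cons, hA, hB]
      rw [← pv_pairs_append c a p h]
      exact ih (c ++ [a]) a (by simp)

-- ===== VERDICT (by name: the statement is the Claim_ definition above) =====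
theorem last_distinct_transitions_py_spec : Claim_equal_last_distinct_transitions_py := by
  intro ms mt _
  unfold Spec_last_distinct_transitions_py last_distinct_transitions_py last_distinct_transitions_py_alt
  cases ms with
  | nil => rfl
  | cons h t =>
    simp only [if_neg (List.cons_ne_nil h t)]
    have hstep0 : (fun acc a => if acc = [] ∨ acc.getLast? ≠ some a then acc ++ [a] else acc) = pvStepA := by
      funext acc a; rfl
    have hstepB : (fun (st : String × List (String × String)) current =>
        if current ≠ st.1 then (current, st.2 ++ [(st.1, current)]) else st) = pvStepB := by
      funext st cur; rfl
    rw [hstep0, hstepB]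
    have h0 : (h :: t).foldl pvStepA [] = t.foldl pvStepA [h] := by
      simp [List.foldl_cons, pvStepA]
    rw [h0]
    rw [PySem.List.slice_to_neg_one, PySem.List.slice_from_one, pv_zip_dropLast_tail]
    have := pv_fold_key t [h] h (by rfl)
    rw [show List.zip (t.foldl pvStepA [h]) (t.foldl pvStepA [h]).tail = pvPairs (t.foldl pvStepA [h]) from rfl,
        this]
    rfl
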